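-- pv_equiv track=rewrite | github.com/BooMBoTTess/Trainings_repo | leetcode/1567 max length.py | slice_negative
-- ===== SOURCE A (Python) =====
-- from typing import List
--
-- def slice_negative(arr: List[int]):
--     left_negative, right_negative = 0,0
--     flag = True
--     for i in range(0, len(arr)):
--         if arr[i] < 0:
--             if flag:
--                 left_negative = i
--                 flag = False
--             right_negative = i
--
--     return arr[left_negative+1: len(arr)], arr[0: right_negative]
-- ===== SOURCE B (Python) =====
-- from typing import List
--
-- def slice_negative(arr: List[int]):
--     n = len(arr)
--     first = next((i for i, x in enumerate(arr) if x < 0), 0)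
--     last = next((i for i in range(n - 1, -1, -1) if arr[i] < 0), 0)
--     return arr[first + 1: n], arr[0: last]
-- ===== Notes on version B (the rewrite author's own statement) =====
-- stated objective: alternative
-- what changed: Replaces the single flag-accumulating full pass with two independent early-terminating scans: a forward scan for the first negative index and a backward scan for the last, both defaulting to 0.
import Mathlib
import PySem

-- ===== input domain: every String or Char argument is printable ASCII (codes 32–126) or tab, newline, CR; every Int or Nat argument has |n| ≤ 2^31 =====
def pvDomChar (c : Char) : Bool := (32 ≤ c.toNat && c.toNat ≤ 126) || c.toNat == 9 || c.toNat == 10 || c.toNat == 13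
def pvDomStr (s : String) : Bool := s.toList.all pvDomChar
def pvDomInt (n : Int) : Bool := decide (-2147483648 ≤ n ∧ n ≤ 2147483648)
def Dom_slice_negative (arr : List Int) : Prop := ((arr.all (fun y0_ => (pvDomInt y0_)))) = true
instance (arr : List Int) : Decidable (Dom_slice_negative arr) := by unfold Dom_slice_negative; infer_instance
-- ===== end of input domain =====

-- B replaces A's single flag-accumulating pass with two independent early-terminating
-- scans (forward for the first negative index, backward for the last); same cost (alternative).

-- ===== PORT A =====
-- A's loop body: state (left_negative, right_negative, flag); index in range, so pyGetD's default is never used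
def sliceNegStep (arr : List Int) (s : Int × Int × Bool) (i : Int) : Int × Int × Bool :=
  if PySem.List.pyGetD arr i 0 < 0 then
    (if s.2.2 then (i, i, false) else (s.1, i, false))
  else s

def slice_negative (arr : List Int) : List Int × List Int :=
  let st := (PySem.List.pyRange 0 arr.length 1).foldl (sliceNegStep arr) (0, 0, true)
  (PySem.List.slice arr (some (st.1 + 1)) (some arr.length),
   PySem.List.slice arr (some 0) (some st.2.1))

-- ===== PORT B =====
-- forward scan: index of the first negative, carrying the current index; 0 if none
def firstNegAux : List Int → Int → Int
  | [], _ => 0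
  | x :: xs, i => if x < 0 then i else firstNegAux xs (i + 1)

-- backward scan over range(n-1,-1,-1), realised as a walk down the reversed list; 0 if none
def lastNegAux : List Int → Int → Int
  | [], _ => 0
  | x :: xs, i => if x < 0 then i else lastNegAux xs (i - 1)

def slice_negative_alt (arr : List Int) : List Int × List Int :=
  let n : Int := arr.length
  let first := firstNegAux arr 0
  let last := lastNegAux arr.reverse (n - 1)
  (PySem.List.slice arr (some (first + 1)) (some n),
   PySem.List.slice arr (some 0) (some last))

-- ===== PRECONDITION & SPEC =====
def Spec_slice_negative (arr : List Int) (out : List Int × List Int) : Prop := out = slice_negative_alt arr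
instance (arr : List Int) (out : List Int × List Int) : Decidable (Spec_slice_negative arr out) := by unfold Spec_slice_negative; infer_instance

-- ===== CLAIM (what is proved, stated in full; the proofs are below) =====
def Claim_equal_slice_negative : Prop := ∀ (arr : List Int), Dom_slice_negative arr → Spec_slice_negative arr (slice_negative arr)

-- ===== LEMMAS AND PROOFS =====

lemma firstNegAux_append_singleton (ys : List Int) (x : Int) (i : Int) :
    firstNegAux (ys ++ [x]) i =
      if ys.any (fun y => decide (y < 0)) then firstNegAux ys i
      else if x < 0 then i + ys.length else 0 := by
  induction ys generalizing i with
  | nil => simp [firstNegAux]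
  | cons y ys ih =>
    by_cases hy : y < 0
    · simp [firstNegAux, hy]
    · simp only [List.cons_append, firstNegAux, hy, if_false, List.any_cons,
        decide_false, Bool.false_or]
      rw [ih]
      split_ifs with h1 h2 <;> simp [List.length_cons] <;> try ring

lemma firstNegAux_of_no_neg (ys : List Int) (i : Int)
    (h : ys.any (fun y => decide (y < 0)) = false) : firstNegAux ys i = 0 := by
  induction ys generalizing i with
  | nil => rfl
  | cons y ys ih =>
    simp only [List.any_cons, Bool.or_eq_false_iff] at h
    simp only [firstNegAux, show ¬ y < 0 by simpa using h.1, if_false]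
    exact ih _ h.2

lemma foldl_step_congr (ys : List Int) (x : Int) :
    ∀ (l : List Int) (init : Int × Int × Bool), (∀ i ∈ l, 0 ≤ i ∧ i < (ys.length : Int)) →
      l.foldl (sliceNegStep (ys ++ [x])) init = l.foldl (sliceNegStep ys) init
  | [], _, _ => rfl
  | i :: l, init, h => by
    have hi := h i (List.mem_cons_self ..)
    obtain ⟨k, rfl⟩ := Int.eq_ofNat_of_zero_le hi.1
    have hk : k < ys.length := by exact_mod_cast hi.2
    simp only [List.foldl_cons]
    rw [show sliceNegStep (ys ++ [x]) init k = sliceNegStep ys init k from by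
      unfold sliceNegStep
      rw [PySem.List.pyGetD_natCast, PySem.List.pyGetD_natCast,
        List.getD_eq_getElem?_getD, List.getD_eq_getElem?_getD,
        List.getElem?_append_left hk]]
    exact foldl_step_congr ys x l _ (fun j hj => h j (List.mem_cons_of_mem _ hj))

lemma loopA_eq (arr : List Int) :
    (PySem.List.pyRange 0 arr.length 1).foldl (sliceNegStep arr) (0, 0, true) =
      (firstNegAux arr 0, lastNegAux arr.reverse ((arr.length : Int) - 1),
       !(arr.any (fun y => decide (y < 0)))) := by
  induction arr using List.reverseRecOn with
  | nil => simp [PySem.List.pyRange_one_eq_nil, firstNegAux, lastNegAux]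
  | append_singleton ys x ih =>
    have hlen : ((ys ++ [x]).length : Int) = (ys.length : Int) + 1 := by
      simp
    rw [hlen, PySem.List.pyRange_one_succ_right (Int.natCast_nonneg _), List.foldl_append]
    rw [foldl_step_congr ys x (PySem.List.pyRange 0 (ys.length : Int) 1) (0, 0, true) (fun i hi => by
      have hm := (PySem.List.mem_pyRange_one).1 hi
      exact ⟨hm.1, hm.2⟩), ih]
    simp only [List.foldl_cons, List.foldl_nil]
    unfold sliceNegStep
    have hget : PySem.List.pyGetD (ys ++ [x]) (ys.length : Int) 0 = x := by
      rw [PySem.List.pyGetD_natCast, List.getD_eq_getElem?_getD, List.getElem?_append_right le_rfl]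
      simp
    rw [hget]
    have hrev : (ys ++ [x]).reverse = x :: ys.reverse := by simp
    rw [hrev, firstNegAux_append_singleton]
    by_cases hx : x < 0
    · by_cases hany : ys.any (fun y => decide (y < 0))
      · simp [hany, hx, lastNegAux]
      · simp [hany, hx, lastNegAux]
    · by_cases hany : ys.any (fun y => decide (y < 0))
      · simp only [hx, if_false, hany, if_true, List.any_append, List.any_cons,
          List.any_nil, decide_eq_true_eq]
        simp [lastNegAux, hx]
      · simp [hx, hany, lastNegAux,
          firstNegAux_of_no_neg ys 0 (by simpa using hany)]

-- ===== VERDICT (by name: the statement is the Claim_ definition above) =====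
theorem slice_negative_spec : Claim_equal_slice_negative := by
  intro arr _
  unfold Spec_slice_negative slice_negative slice_negative_alt
  rw [loopA_eq]
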